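-- pv_equiv track=rewrite | github.com/a-green-hand-jack/antibody-abtigen | scripts/check_alignment_v2.py | build_selection
-- ===== SOURCE A (Python) =====
-- def build_selection(pdb_id, obj_name, epitopes):
--     """Build PyMOL selection string for epitope residues."""
--     if pdb_id not in epitopes:
--         return "none"
--
--     residues = epitopes[pdb_id]
--     # Group by chain
--     by_chain = {}
--     for r in residues:
--         chain = r['chain']
--         if chain not in by_chain:
--             by_chain[chain] = []
--         by_chain[chain].append(r['resi'])
--
--     # Build selection
--     parts = []
--     for chain, resis in by_chain.items():
--         resi_str = "+".join(resis)
--         parts.append(f"(chain {chain} and resi {resi_str})")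
--
--     if parts:
--         sel = " or ".join(parts)
--         return f"{obj_name} and ({sel}) and name CA"
--     return "none"
-- ===== SOURCE B (Python) =====
-- def build_selection(pdb_id, obj_name, epitopes):
--     """Build PyMOL selection string for epitope residues."""
--     if pdb_id not in epitopes:
--         return "none"
--
--     residues = epitopes[pdb_id]
--     # Distinct chains in first-appearance order, then one filtering scan per chain.
--     chains = list(dict.fromkeys(r['chain'] for r in residues))
--     parts = [
--         "(chain {} and resi {})".format(
--             c, "+".join(r['resi'] for r in residues if r['chain'] == c))
--         for c in chains
--     ]
--     if not parts:
--         return "none"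
--     return "{} and ({}) and name CA".format(obj_name, " or ".join(parts))
-- ===== Notes on version B (the rewrite author's own statement) =====
-- stated objective: alternative
-- what changed: B replaces A's single-pass dict-of-lists grouping with a dedup of chains in first-appearance order followed by one filtering re-scan of the residue list per chain.
import Mathlib
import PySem

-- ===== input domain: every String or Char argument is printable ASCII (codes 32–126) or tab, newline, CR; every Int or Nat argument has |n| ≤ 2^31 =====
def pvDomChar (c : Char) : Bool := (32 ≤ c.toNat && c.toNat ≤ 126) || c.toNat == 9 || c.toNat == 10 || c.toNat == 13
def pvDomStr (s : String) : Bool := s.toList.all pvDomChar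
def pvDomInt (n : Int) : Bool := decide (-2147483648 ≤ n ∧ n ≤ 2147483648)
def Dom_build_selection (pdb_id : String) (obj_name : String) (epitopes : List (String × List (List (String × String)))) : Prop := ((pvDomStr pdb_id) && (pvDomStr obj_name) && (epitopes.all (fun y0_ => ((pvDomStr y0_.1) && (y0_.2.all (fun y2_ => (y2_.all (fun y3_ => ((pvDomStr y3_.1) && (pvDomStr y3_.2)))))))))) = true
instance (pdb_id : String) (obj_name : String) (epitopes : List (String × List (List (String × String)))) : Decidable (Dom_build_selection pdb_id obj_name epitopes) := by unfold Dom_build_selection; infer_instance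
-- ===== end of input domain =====

-- B groups by re-scanning the residue list once per distinct chain instead of building a
-- dict of lists in one pass (objective: alternative decomposition, same results).

-- ===== PORT A =====

-- r['chain'] / r['resi']: Pre_ excludes residue dicts missing these keys (Python KeyError),
-- so the "" default of getD is never reached on admitted inputs.
def pvChainOf (r : List (String × String)) : String := (PySem.Dict.mk r).getD "chain" ""
def pvResiOf (r : List (String × String)) : String := (PySem.Dict.mk r).getD "resi" ""

def pvFmtPart (c : String) (resis : List String) : String :=
  "(chain " ++ c ++ " and resi " ++ PySem.Str.join "+" resis ++ ")"

def build_selection (pdb_id : String) (obj_name : String) (epitopes : List (String × List (List (String × String)))) : String :=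
  match (PySem.Dict.mk epitopes).get? pdb_id with
  | none => "none"                                   -- if pdb_id not in epitopes
  | some residues =>
    -- by_chain = {}; for r in residues: if chain not in by_chain: by_chain[chain]=[]; append
    let by_chain : PySem.Dict String (List String) :=
      residues.foldl (fun d r =>
        let chain := pvChainOf r
        let d' := if d.contains chain then d else d.insert chain []
        d'.modify chain [] (fun l => l ++ [pvResiOf r])) PySem.Dict.empty
    -- parts = []; for chain, resis in by_chain.items(): parts.append(...)
    let parts : List String :=
      by_chain.items.foldl (fun ps p => ps ++ [pvFmtPart p.1 p.2]) []
    if !parts.isEmpty then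
      obj_name ++ " and (" ++ PySem.Str.join " or " parts ++ ") and name CA"
    else "none"

-- ===== PORT B =====
def build_selection_alt (pdb_id : String) (obj_name : String) (epitopes : List (String × List (List (String × String)))) : String :=
  match (PySem.Dict.mk epitopes).get? pdb_id with
  | none => "none"
  | some residues =>
    -- chains = list(dict.fromkeys(r['chain'] for r in residues))
    let chains : List String := PySem.List.dedup (residues.map pvChainOf)
    -- one filtering re-scan of residues per chain
    let parts : List String :=
      chains.map (fun c =>
        pvFmtPart c ((residues.filter (fun r => pvChainOf r == c)).map pvResiOf))
    if parts.isEmpty then "none"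
    else obj_name ++ " and (" ++ PySem.Str.join " or " parts ++ ") and name CA"

-- ===== PRECONDITION & SPEC =====
-- Pre_ excludes exactly the inputs where A raises KeyError: some residue dict under the
-- looked-up pdb_id entry lacks a 'chain' or 'resi' key.
def Pre_build_selection (pdb_id : String) (obj_name : String) (epitopes : List (String × List (List (String × String)))) : Prop :=
  ∀ r ∈ ((PySem.Dict.mk epitopes).get? pdb_id).getD [],
    (PySem.Dict.mk r).contains "chain" = true ∧ (PySem.Dict.mk r).contains "resi" = true
instance (pdb_id : String) (obj_name : String) (epitopes : List (String × List (List (String × String)))) : Decidable (Pre_build_selection pdb_id obj_name epitopes) := by unfold Pre_build_selection; infer_instance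

def pvWitness_build_selection : String × String × (List (String × List (List (String × String)))) :=
  ("1abc", "ep_1abc", [("1abc", [[("chain", "A"), ("resi", "10")], [("chain", "B"), ("resi", "7")]])])

def Spec_build_selection (pdb_id : String) (obj_name : String) (epitopes : List (String × List (List (String × String)))) (out : String) : Prop := out = build_selection_alt pdb_id obj_name epitopes
instance (pdb_id : String) (obj_name : String) (epitopes : List (String × List (List (String × String)))) (out : String) : Decidable (Spec_build_selection pdb_id obj_name epitopes out) := by unfold Spec_build_selection; infer_instance

-- ===== CLAIM (what is proved, stated in full; the proofs are below) =====
def Claim_equal_build_selection : Prop := ∀ (pdb_id : String) (obj_name : String) (epitopes : List (String × List (List (String × String)))), Dom_build_selection pdb_id obj_name epitopes → Pre_build_selection pdb_id obj_name epitopes → Spec_build_selection pdb_id obj_name epitopes (build_selection pdb_id obj_name epitopes)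

-- ===== LEMMAS AND PROOFS =====

-- A's loop body (insert-if-absent then append) is the same dict transformer as a plain
-- modify with default [].
theorem pvStep_eq (d : PySem.Dict String (List String)) (r : List (String × String)) :
    (let chain := pvChainOf r
     let d' := if d.contains chain then d else d.insert chain []
     d'.modify chain [] (fun l => l ++ [pvResiOf r]))
    = d.modify (pvChainOf r) [] (fun l => l ++ [pvResiOf r]) := by
  have hm : ∀ (e : PySem.Dict String (List String)),
      e.modify (pvChainOf r) [] (fun l => l ++ [pvResiOf r])
        = e.insert (pvChainOf r) (e.getD (pvChainOf r) [] ++ [pvResiOf r]) := fun _ => rfl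
  by_cases h : d.contains (pvChainOf r) = true
  · simp only [h, if_pos]
  · simp only [Bool.not_eq_true] at h
    simp only [h, Bool.false_eq_true, if_neg, not_false_iff, hm,
      PySem.Dict.getD_insert_self, PySem.Dict.insert_insert_self,
      PySem.Dict.getD_of_not_contains d [] h]

-- A's by_chain dict: keys and per-key values in closed form.
theorem pvByChain_items (residues : List (List (String × String))) :
    (residues.foldl (fun d r =>
        let chain := pvChainOf r
        let d' := if d.contains chain then d else d.insert chain []
        d'.modify chain [] (fun l => l ++ [pvResiOf r])) PySem.Dict.empty).items
    = (PySem.List.dedup (residues.map pvChainOf)).map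
        (fun c => (c, (residues.filter (fun r => pvChainOf r == c)).map pvResiOf)) := by
  have hstep : (fun (d : PySem.Dict String (List String)) (r : List (String × String)) =>
        let chain := pvChainOf r
        let d' := if d.contains chain then d else d.insert chain []
        d'.modify chain [] (fun l => l ++ [pvResiOf r]))
      = (fun d r => d.modify (pvChainOf r) [] (fun l => l ++ [pvResiOf r])) :=
    funext fun d => funext fun r => pvStep_eq d r
  rw [hstep]
  have hkeys : (residues.foldl (fun d r => d.modify (pvChainOf r) [] (fun l => l ++ [pvResiOf r]))
      PySem.Dict.empty).keys = PySem.List.dedup (residues.map pvChainOf) := by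
    rw [PySem.Dict.keys_foldl_modify_key]
    simp [PySem.Set.update_nil_left]
  have hnd : (residues.foldl (fun d r => d.modify (pvChainOf r) [] (fun l => l ++ [pvResiOf r]))
      PySem.Dict.empty).keys.Nodup := by
    rw [hkeys]; exact PySem.List.nodup_dedup _
  rw [PySem.Dict.items_eq_map_keys _ hnd ([] : List String), hkeys]
  refine List.map_congr_left (fun c hc => ?_)
  congr 1
  have hg := PySem.Dict.getD_foldl_modify_append
    (residues.map (fun r => (pvChainOf r, pvResiOf r)))
    (PySem.Dict.empty : PySem.Dict String (List String)) c
  rw [List.foldl_map] at hg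
  rw [hg, PySem.Dict.getD_empty]
  simp [List.filter_map, Function.comp_def]

-- ===== VERDICT (by name: the statement is the Claim_ definition above) =====
theorem build_selection_spec : Claim_equal_build_selection := by
  intro pdb_id obj_name epitopes _ _
  unfold Spec_build_selection build_selection build_selection_alt
  cases h : (PySem.Dict.mk epitopes).get? pdb_id with
  | none => rfl
  | some residues =>
    simp only [pvByChain_items, PySem.List.foldl_append_singleton_eq_map, List.map_map,
      Function.comp_def, List.nil_append]
    cases (PySem.List.dedup (residues.map pvChainOf)).map
        (fun c => pvFmtPart c ((residues.filter (fun r => pvChainOf r == c)).map pvResiOf)) with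
    | nil => rfl
    | cons p ps => rfl
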